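-- pv_equiv track=rewrite | github.com/artyzhang/Stop-Files-to-Excel | Stop Files to Excel Conversion Folder.py | repetitions
-- ===== SOURCE A (Python) =====
-- def allblanks(i): # Returns blank if all items in a list are blank
--     if i.count('') == len(i):
--         return 'Blank'
--     else:
--         return i
--
-- def repetitions(rows): # Finds irregular ranges of blank values
--     transformed = [allblanks(r) for r in rows]
--     indexed = [i for i, j in enumerate(transformed) if j == 'Blank']
--     notinpattern = []
--     for i,k in enumerate(indexed[:-1]):
--         if k+2 != indexed[i+1]:
--             notinpattern.append(k)
--     return notinpattern
-- ===== SOURCE B (Python) =====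
-- def repetitions(rows):  # Finds irregular ranges of blank values
--     # A blank row i is flagged iff it is not the last blank row and the
--     # local window test fails: rows i+1 non-blank and i+2 blank would mean
--     # the next blank is exactly i+2 (the every-other-row pattern).
--     blank = [all(c == '' for c in r) for r in rows]
--     n = len(blank)
--     remaining = sum(blank)
--     out = []
--     for i, b in enumerate(blank):
--         if b:
--             remaining -= 1
--             if remaining and not (i + 2 < n and blank[i + 2] and not blank[i + 1]):
--                 out.append(i)
--     return out
-- ===== Notes on version B (the rewrite author's own statement) =====
-- stated objective: alternative
-- what changed: Instead of building the list of blank-row indices and comparing each with its successor (A's three-stage pipeline with a [:-1] slice), B never builds an index list: it computes a blankness bitmap and flags each blank row by a purely local window test (row i+1 non-blank and row i+2 blank means the pattern holds) together with a remaining-blank counter that detects the final blank row.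
import Mathlib
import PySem

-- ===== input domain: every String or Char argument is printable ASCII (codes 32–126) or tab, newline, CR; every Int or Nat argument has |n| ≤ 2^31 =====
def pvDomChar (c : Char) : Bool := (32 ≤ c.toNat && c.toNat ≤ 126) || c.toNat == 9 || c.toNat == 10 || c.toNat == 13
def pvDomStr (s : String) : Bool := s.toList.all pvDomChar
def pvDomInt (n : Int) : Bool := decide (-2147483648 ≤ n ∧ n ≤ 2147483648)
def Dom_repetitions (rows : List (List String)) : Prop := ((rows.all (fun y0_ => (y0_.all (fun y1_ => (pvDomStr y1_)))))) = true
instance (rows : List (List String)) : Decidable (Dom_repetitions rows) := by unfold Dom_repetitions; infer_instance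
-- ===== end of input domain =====

-- B replaces A's successive-blank-index comparison (index list + pairwise scan of neighbours)
-- with a pointwise local window test on a blankness bitmap (blank[i+1]/blank[i+2]) plus a
-- remaining-blank counter that detects the last blank row; no list of blank indices is built.

-- ===== PORT A =====
-- allblanks: returns the sentinel string 'Blank' or the row itself (a union, ported as Sum)
def allblanksA (i : List String) : String ⊕ List String :=
  if PySem.List.count i "" = i.length then Sum.inl "Blank" else Sum.inr i

def repetitions (rows : List (List String)) : List Int :=
  let transformed := rows.map allblanksA
  let indexed := ((PySem.List.enumerate transformed 0).filter
      (fun p => decide (p.2 = Sum.inl "Blank"))).map (·.1)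
  let notinpattern := (PySem.List.enumerate (PySem.List.slice indexed none (some (-1))) 0).foldl
      (fun acc p =>
        match PySem.List.pyGet? indexed (p.1 + 1) with
        | some nxt => if p.2 + 2 ≠ nxt then acc ++ [p.2] else acc
        | none => acc) []
  notinpattern

-- ===== PORT B =====
-- loop body of Source B (state = (out, remaining)); blank[i+2]/blank[i+1] are in range whenever
-- read, thanks to the short-circuited 'i + 2 < n' guard, so pyGetD is exact here
def bstep (blank : List Bool) (n : Int) (st : List Int × Int) (p : Int × Bool) : List Int × Int :=
  if p.2 then
    let remaining := st.2 - 1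
    if remaining ≠ 0 ∧
        ¬(p.1 + 2 < n ∧ PySem.List.pyGetD blank (p.1 + 2) false = true ∧
          ¬(PySem.List.pyGetD blank (p.1 + 1) false = true))
    then (st.1 ++ [p.1], remaining) else (st.1, remaining)
  else st

def repetitions_alt (rows : List (List String)) : List Int :=
  let blank := rows.map (fun r => r.all (fun c => c == ""))
  let n : Int := (blank.length : Int)
  let remaining : Int := (blank.count true : Int)   -- sum(blank)
  ((PySem.List.enumerate blank 0).foldl (bstep blank n) ([], remaining)).1

-- ===== PRECONDITION & SPEC =====
def Spec_repetitions (rows : List (List String)) (out : List Int) : Prop := out = repetitions_alt rows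
instance (rows : List (List String)) (out : List Int) : Decidable (Spec_repetitions rows out) := by unfold Spec_repetitions; infer_instance

-- ===== CLAIM =====
def Claim_equal_repetitions : Prop := ∀ (rows : List (List String)), Dom_repetitions rows → Spec_repetitions rows (repetitions rows)

-- ===== LEMMAS AND PROOFS =====

-- the common value: the pairwise scan of a list of blank indices
def pairScan : List Int → List Int
  | [] => []
  | [_] => []
  | x :: y :: t => (if x + 2 ≠ y then [x] else []) ++ pairScan (y :: t)

-- the blank indices of an enumerated row list
def blanksOf (pairs : List (Int × List String)) : List Int :=
  (pairs.filter (fun q => q.2.all (fun x => x == ""))).map (·.1)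

-- the blank indices of a blankness bitmap, starting at index s
def idx : List Bool → Int → List Int
  | [], _ => []
  | b :: t, s => (if b then [s] else []) ++ idx t (s + 1)

theorem blanksOf_cons (q : Int × List String) (t : List (Int × List String)) :
    blanksOf (q :: t) =
      (if q.2.all (fun x => x == "") then [q.1] else []) ++ blanksOf t := by
  simp only [blanksOf, List.filter_cons]
  split <;> simp

-- A's blankness test agrees with B's
theorem allblanksA_eq_inl (r : List String) :
    (allblanksA r = Sum.inl "Blank") ↔ (r.all (fun x => x == "")) = true := by
  unfold allblanksA
  rw [PySem.List.count_eq]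
  split <;> rename_i h
  · simp only [List.count_eq_length] at h
    constructor
    · intro _; simp only [List.all_eq_true]
      intro x hx; exact beq_iff_eq.mpr (h x hx).symm
    · intro _; rfl
  · simp only [List.count_eq_length] at h
    constructor
    · intro hc; cases hc
    · intro hall
      exfalso; apply h
      intro x hx
      simp only [List.all_eq_true] at hall
      exact (beq_iff_eq.mp (hall x hx)).symm

-- A's indexed list equals blanksOf of the enumeration of rows
theorem indexed_eq_blanksOf (rows : List (List String)) (s : Int) :
    ((PySem.List.enumerate (rows.map allblanksA) s).filter
        (fun p => decide (p.2 = Sum.inl "Blank"))).map (·.1)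
      = blanksOf (PySem.List.enumerate rows s) := by
  induction rows generalizing s with
  | nil => rfl
  | cons r t ih =>
    simp only [List.map_cons, PySem.List.enumerate_cons, List.filter_cons, blanksOf_cons]
    by_cases h : (r.all (fun x => x == "")) = true
    · rw [← allblanksA_eq_inl] at h
      simp only [h, decide_true, (allblanksA_eq_inl r).mp h, if_true,
        List.cons_append, List.nil_append, List.map_cons, List.cons.injEq, true_and]
      exact ih (s + 1)
    · have h' : ¬ allblanksA r = Sum.inl "Blank" := fun hc => h ((allblanksA_eq_inl r).mp hc)
      simp only [h', decide_false, eq_false h]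
      simp only [if_false, List.nil_append, Bool.false_eq_true]
      exact ih (s + 1)

-- blanksOf of the enumeration is idx of the blankness bitmap
theorem blanksOf_eq_idx (rows : List (List String)) (s : Int) :
    blanksOf (PySem.List.enumerate rows s)
      = idx (rows.map (fun r => r.all (fun c => c == ""))) s := by
  induction rows generalizing s with
  | nil => rfl
  | cons r t ih =>
    simp only [PySem.List.enumerate_cons, blanksOf_cons, List.map_cons, idx]
    rw [ih (s + 1)]

-- A's pairwise loop computes pairScan (generalized over a processed prefix)
theorem aloop_gen (t : List Int) :
    ∀ (x : Int) (pre acc : List Int),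
    (PySem.List.enumerate ((x :: t).dropLast) (pre.length : Int)).foldl
      (fun acc p =>
        match PySem.List.pyGet? (pre ++ x :: t) (p.1 + 1) with
        | some nxt => if p.2 + 2 ≠ nxt then acc ++ [p.2] else acc
        | none => acc) acc
      = acc ++ pairScan (x :: t) := by
  induction t with
  | nil => intro x pre acc; simp [pairScan]
  | cons y t' ih =>
    intro x pre acc
    have hdl : (x :: y :: t').dropLast = x :: (y :: t').dropLast := rfl
    rw [hdl, PySem.List.enumerate_cons, List.foldl_cons]
    have hget : PySem.List.pyGet? (pre ++ x :: y :: t') ((pre.length : Int) + 1) = some y := by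
      have : ((pre.length : Int) + 1) = ((pre ++ [x]).length : Int) := by simp
      rw [this]
      have := PySem.List.pyGet?_append_length (pre := pre ++ [x]) (y := y) (ys := t')
      simpa using this
    rw [hget]
    have hfull : pre ++ x :: y :: t' = (pre ++ [x]) ++ y :: t' := by simp
    have hlen : (pre.length : Int) + 1 = ((pre ++ [x]).length : Int) := by simp
    rw [hfull, hlen]
    rw [ih y (pre ++ [x]) (if x + 2 ≠ y then acc ++ [x] else acc)]
    have : pairScan (x :: y :: t') = (if x + 2 ≠ y then [x] else []) ++ pairScan (y :: t') := rfl
    rw [this]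
    split <;> simp

theorem aloop (bl : List Int) :
    (PySem.List.enumerate (PySem.List.slice bl none (some (-1))) 0).foldl
      (fun acc p =>
        match PySem.List.pyGet? bl (p.1 + 1) with
        | some nxt => if p.2 + 2 ≠ nxt then acc ++ [p.2] else acc
        | none => acc) []
      = pairScan bl := by
  rw [PySem.List.slice_to_neg_one]
  cases bl with
  | nil => rfl
  | cons x t =>
    have := aloop_gen t x [] []
    simpa using this

-- idx is empty exactly when the bitmap has no true
theorem idx_eq_nil_iff (t : List Bool) (s : Int) : idx t s = [] ↔ t.count true = 0 := by
  induction t generalizing s with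
  | nil => simp [idx]
  | cons b t' ih =>
    cases b <;> simp [idx, ih]

-- every index produced by idx is ≥ the start
theorem idx_ge (t : List Bool) (s : Int) : ∀ x ∈ idx t s, s ≤ x := by
  induction t generalizing s with
  | nil => simp [idx]
  | cons b t' ih =>
    intro x hx
    cases b with
    | true =>
      simp only [idx, if_true, List.cons_append, List.nil_append, List.mem_cons] at hx
      rcases hx with rfl | hx
      · exact le_refl _
      · linarith [ih (s + 1) x hx]
    | false =>
      simp only [idx, if_false, List.nil_append, Bool.false_eq_true] at hx
      linarith [ih (s + 1) x hx]

-- the step at a blank row: B's window-and-counter test agrees with the pairwise scan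
theorem step_eq (pre t : List Bool) (acc : List Int) :
    (if ((t.count true : Int) ≠ 0 ∧
        ¬((pre.length : Int) + 2 < ((pre ++ true :: t).length : Int) ∧
          PySem.List.pyGetD (pre ++ true :: t) ((pre.length : Int) + 2) false = true ∧
          ¬(PySem.List.pyGetD (pre ++ true :: t) ((pre.length : Int) + 1) false = true)))
      then acc ++ [(pre.length : Int)] else acc) ++ pairScan (idx t ((pre.length : Int) + 1))
    = acc ++ pairScan ((pre.length : Int) :: idx t ((pre.length : Int) + 1)) := by
  have hget1 : ∀ (u : List Bool) (b0 : Bool),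
      PySem.List.pyGetD (pre ++ true :: b0 :: u) ((pre.length : Int) + 1) false = b0 := by
    intro u b0
    have h : (pre.length : Int) + 1 = (((pre ++ [true]).length : Nat) : Int) := by simp
    rw [h, PySem.List.pyGetD_natCast]
    have : pre ++ true :: b0 :: u = (pre ++ [true]) ++ b0 :: u := by simp
    rw [this, List.getD_eq_getElem?_getD, List.getElem?_append_right (by simp)]
    simp
  have hget2 : ∀ (u : List Bool) (b0 b1 : Bool),
      PySem.List.pyGetD (pre ++ true :: b0 :: b1 :: u) ((pre.length : Int) + 2) false = b1 := by
    intro u b0 b1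
    have h : (pre.length : Int) + 2 = (((pre ++ [true, b0]).length : Nat) : Int) := by
      simp only [List.length_append, List.length_cons, List.length_nil]; omega
    rw [h, PySem.List.pyGetD_natCast]
    have : pre ++ true :: b0 :: b1 :: u = (pre ++ [true, b0]) ++ b1 :: u := by simp
    rw [this, List.getD_eq_getElem?_getD, List.getElem?_append_right (by simp)]
    simp
  cases t with
  | nil =>
    simp [pairScan, idx]
  | cons b0 t' =>
    cases b0 with
    | true =>
      -- next row blank: next blank index is pre.length+1 ≠ pre.length+2 → flagged
      have hc : (( (true :: t').count true : Int) ≠ 0) := by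
        have h : (true :: t').count true = t'.count true + 1 := by simp [List.count_cons]
        rw [h]; push_cast; omega
      rw [hget1]
      simp only [idx, if_true, List.cons_append, List.nil_append]
      have : pairScan ((pre.length : Int) :: ((pre.length : Int) + 1) :: idx t' ((pre.length : Int) + 1 + 1))
          = (if (pre.length : Int) + 2 ≠ (pre.length : Int) + 1 then [(pre.length : Int)] else [])
            ++ pairScan (((pre.length : Int) + 1) :: idx t' ((pre.length : Int) + 1 + 1)) := rfl
      rw [this]
      simp only [hc, ne_eq, not_true_eq_false, not_false_eq_true, true_and]
      have h2 : ¬((pre.length : Int) + 2 = (pre.length : Int) + 1) := by omega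
      simp [h2]
    | false =>
      cases t' with
      | nil =>
        simp [pairScan, idx]
      | cons b1 t'' =>
        rw [hget1, hget2]
        cases b1 with
        | true =>
          -- pattern holds: next blank is exactly pre.length+2 → not flagged
          simp only [idx, if_false, if_true, List.nil_append, List.cons_append,
            Bool.false_eq_true]
          have hpair : pairScan ((pre.length : Int) :: ((pre.length : Int) + 1 + 1) :: idx t'' ((pre.length : Int) + 1 + 1 + 1))
              = (if (pre.length : Int) + 2 ≠ (pre.length : Int) + 1 + 1 then [(pre.length : Int)] else [])
                ++ pairScan (((pre.length : Int) + 1 + 1) :: idx t'' ((pre.length : Int) + 1 + 1 + 1)) := rfl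
          have hn : (pre.length : Int) + 2 < ((pre ++ true :: false :: true :: t'').length : Int) := by
            simp; omega
          have heq : ((pre.length : Int) + 2 = (pre.length : Int) + 1 + 1) := by ring
          simp [hpair, heq]
          omega
        | false =>
          -- neither of the next two rows blank: flagged iff any blank remains
          simp only [idx, if_false, List.nil_append, Bool.false_eq_true]
          have hcnt : ((false :: false :: t'').count true) = t''.count true := by
            simp [List.count_cons]
          rw [hcnt]
          by_cases hz : t''.count true = 0
          · have hnil : idx t'' ((pre.length : Int) + 1 + 1 + 1) = [] :=
              (idx_eq_nil_iff _ _).mpr hz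
            simp [hnil, pairScan, hz]
          · have hne : idx t'' ((pre.length : Int) + 1 + 1 + 1) ≠ [] := by
              intro h; exact hz ((idx_eq_nil_iff _ _).mp h)
            obtain ⟨x, L, hL⟩ := List.exists_cons_of_ne_nil hne
            have hx : (pre.length : Int) + 1 + 1 + 1 ≤ x := by
              apply idx_ge; rw [hL]; exact List.mem_cons_self
            have hpair : pairScan ((pre.length : Int) :: x :: L)
                = (if (pre.length : Int) + 2 ≠ x then [(pre.length : Int)] else [])
                  ++ pairScan (x :: L) := rfl
            have hxx : (pre.length : Int) + 2 ≠ x := by omega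
            have hz' : ((t''.count true : Int) ≠ 0) := by exact_mod_cast hz
            simp only [hL, hpair, hxx, if_true, ne_eq, not_false_eq_true]
            simp [hz]

-- B's fold computes pairScan of idx (generalized over a processed prefix)
theorem bloop (t : List Bool) :
    ∀ (pre : List Bool) (acc : List Int),
    ((PySem.List.enumerate t (pre.length : Int)).foldl
        (bstep (pre ++ t) (((pre ++ t).length : Nat) : Int)) (acc, (t.count true : Int))).1
      = acc ++ pairScan (idx t (pre.length : Int)) := by
  induction t with
  | nil => intro pre acc; simp [idx, pairScan]
  | cons b t' ih =>
    intro pre acc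
    rw [PySem.List.enumerate_cons, List.foldl_cons]
    cases b with
    | false =>
      have hstep : bstep (pre ++ false :: t') (((pre ++ false :: t').length : Nat) : Int)
          (acc, ((false :: t').count true : Int)) ((pre.length : Int), false)
          = (acc, (t'.count true : Int)) := by
        simp [bstep]
      rw [hstep]
      have hpre : pre ++ false :: t' = (pre ++ [false]) ++ t' := by simp
      have hlen : (pre.length : Int) + 1 = (((pre ++ [false]).length : Nat) : Int) := by simp
      rw [hpre, hlen, ih (pre ++ [false]) acc]
      simp [idx]
    | true =>
      have hcnt : (((true :: t').count true : Int)) - 1 = (t'.count true : Int) := by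
        simp [List.count_cons]
      have hstep : bstep (pre ++ true :: t') (((pre ++ true :: t').length : Nat) : Int)
          (acc, ((true :: t').count true : Int)) ((pre.length : Int), true)
          = ((if ((t'.count true : Int) ≠ 0 ∧
                ¬((pre.length : Int) + 2 < ((pre ++ true :: t').length : Int) ∧
                  PySem.List.pyGetD (pre ++ true :: t') ((pre.length : Int) + 2) false = true ∧
                  ¬(PySem.List.pyGetD (pre ++ true :: t') ((pre.length : Int) + 1) false = true)))
              then acc ++ [(pre.length : Int)] else acc), (t'.count true : Int)) := by
        simp only [bstep, if_true, hcnt]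
        split <;> rfl
      rw [hstep]
      have hpre : pre ++ true :: t' = (pre ++ [true]) ++ t' := by simp
      have hlen : (pre.length : Int) + 1 = (((pre ++ [true]).length : Nat) : Int) := by simp
      rw [hpre, hlen, ih (pre ++ [true])]
      rw [← hpre, ← hlen]
      have := step_eq pre t' acc
      rw [this]
      simp only [idx, if_true, List.cons_append, List.nil_append]

-- ===== VERDICT =====
theorem repetitions_spec : Claim_equal_repetitions := by
  intro rows _
  unfold Spec_repetitions repetitions repetitions_alt
  simp only []
  rw [indexed_eq_blanksOf rows 0, aloop, blanksOf_eq_idx]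
  have := bloop (rows.map (fun r => r.all (fun c => c == ""))) [] []
  simp only [List.nil_append, List.length_nil, Nat.cast_zero] at this
  rw [this]
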